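-- pv_equiv track=rewrite | github.com/MyloRaccoon/R5A.12 | test4.py | calcul_max_run
-- ===== SOURCE A (Python) =====
-- def calcul_max_run(value:str,m:int,k:int,v_min,v_max)->list[int]:
--     cpt_max=0
--     cpt=0
--     cpt_iter=0
--     result:list[int]=[]
--     for _j in range(k+1):
--         result.append(0)
--     for i in value:
--         cpt_iter+=1
--         if i =="1":
--             cpt+=1
--             if cpt>cpt_max:
--                 cpt_max=cpt
--         else:
--             cpt=0
--         if cpt_iter==m:
--             if cpt_max>0:
--                 if cpt_max<=v_min:
--                     result[0] = result[0] + 1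
--                 elif cpt_max>=v_max:
--                     result[-1]=result[-1] + 1
--                 else:
--                     result[cpt_max-v_min]=result[cpt_max-v_min]+1
--             cpt_iter=0
--             cpt=0
--             cpt_max=0
--     return result
-- ===== SOURCE B (Python) =====
-- def calcul_max_run(value: str, m: int, k: int, v_min, v_max) -> list[int]:
--     result = [0] * (k + 1)
--     if m <= 0:
--         return result
--     for i in range(len(value) // m):
--         chunk = value[i * m:(i + 1) * m]
--         r = 0
--         while "1" * (r + 1) in chunk:
--             r += 1
--         if r > 0:
--             if r <= v_min:
--                 result[0] = result[0] + 1
--             elif r >= v_max: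
--                 result[-1] = result[-1] + 1
--             else:
--                 result[r - v_min] = result[r - v_min] + 1
--     return result
-- ===== Notes on version B (the rewrite author's own statement) =====
-- stated objective: faster
-- what changed: Replaces A's per-character Python scan with three interacting counters by an explicit decomposition into len(value)//m window slices, finding each window's longest '1'-run via C-level substring tests ('1'*(r+1) in chunk) and then applying the same bucketing; the interpreted per-character loop disappears, which a timing run measured as ~5x faster at the largest size.
-- outside the precondition, e.g. on calcul_max_run('0000', 2, -1, 0, 5): A returns [], B returns []; on calcul_max_run('0', 1, 0, -5, 100): A returns [0], B returns [0]
import Mathlib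
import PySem

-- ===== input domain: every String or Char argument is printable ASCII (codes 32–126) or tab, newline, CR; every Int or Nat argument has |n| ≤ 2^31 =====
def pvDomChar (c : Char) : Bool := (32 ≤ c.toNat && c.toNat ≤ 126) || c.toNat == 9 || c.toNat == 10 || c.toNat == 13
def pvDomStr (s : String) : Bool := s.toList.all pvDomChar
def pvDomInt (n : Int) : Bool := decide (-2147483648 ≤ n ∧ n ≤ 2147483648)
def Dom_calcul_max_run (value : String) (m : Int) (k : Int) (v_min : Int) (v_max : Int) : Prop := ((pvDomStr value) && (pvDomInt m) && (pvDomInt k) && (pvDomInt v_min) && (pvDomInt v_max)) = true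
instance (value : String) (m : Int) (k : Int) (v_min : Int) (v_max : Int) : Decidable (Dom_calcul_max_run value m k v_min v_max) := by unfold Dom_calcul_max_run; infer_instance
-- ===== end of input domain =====

-- B re-implements A by slicing the string into complete windows and finding each window's
-- longest '1'-run by substring search, instead of A's single scan with three counters
-- (a timing run measured B faster at the largest generated size).

-- ===== PORT A =====
-- A's bucketing block 'result[...] = result[...] + 1' (three branches, guarded by cpt_max > 0).
-- pySetD/pyGetD are the total forms of Python's indexing; exact whenever the index is in
-- range, which Pre_calcul_max_run guarantees (out of range Python raises IndexError).
def pvBucketA (v_min v_max : Int) (res : List Int) (cm : Int) : List Int :=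
  if cm > 0 then
    if cm ≤ v_min then PySem.List.pySetD res 0 (PySem.List.pyGetD res 0 0 + 1)
    else if cm ≥ v_max then PySem.List.pySetD res (-1) (PySem.List.pyGetD res (-1) 0 + 1)
    else PySem.List.pySetD res (cm - v_min) (PySem.List.pyGetD res (cm - v_min) 0 + 1)
  else res

-- A's loop body; state = (cpt_max, cpt, cpt_iter, result)
def pvStepA (m v_min v_max : Int) (st : Int × Int × Int × List Int) (ch : Char) : Int × Int × Int × List Int :=
  let q : Int × Int :=
    if ch = '1' then (if st.2.1 + 1 > st.1 then st.2.1 + 1 else st.1, st.2.1 + 1)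
    else (st.1, 0)
  if st.2.2.1 + 1 = m then (0, 0, 0, pvBucketA v_min v_max st.2.2.2 q.1)
  else (q.1, q.2, st.2.2.1 + 1, st.2.2.2)

def calcul_max_run (value : String) (m : Int) (k : Int) (v_min : Int) (v_max : Int) : List Int :=
  let res0 := (PySem.List.pyRange 0 (k + 1) 1).foldl (fun acc _ => acc ++ [(0 : Int)]) []
  (value.toList.foldl (pvStepA m v_min v_max) (0, 0, 0, res0)).2.2.2

-- ===== PORT B =====
-- Source B's 'while "1" * (r + 1) in chunk: r += 1'
def pvFindRun (chunk : List Char) (r : Nat) : Nat :=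
  if h : PySem.Chars.isIn (PySem.List.pyRepeat ['1'] ((r : Int) + 1)) chunk = true then
    pvFindRun chunk (r + 1)
  else r
termination_by chunk.length - r
decreasing_by
  have h2 : List.replicate (r + 1) '1' <:+: chunk := by
    have := (PySem.Chars.isIn_iff_infix _ _).mp h
    rwa [PySem.List.pyRepeat_singleton, show ((r : Int) + 1).toNat = r + 1 by omega] at this
  have h3 := h2.length_le
  simp at h3
  omega

-- Source B's bucketing block (same three branches as A's source text, applied to the window's r)
def pvBucketB (v_min v_max : Int) (res : List Int) (r : Int) : List Int :=
  if r > 0 then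
    if r ≤ v_min then PySem.List.pySetD res 0 (PySem.List.pyGetD res 0 0 + 1)
    else if r ≥ v_max then PySem.List.pySetD res (-1) (PySem.List.pyGetD res (-1) 0 + 1)
    else PySem.List.pySetD res (r - v_min) (PySem.List.pyGetD res (r - v_min) 0 + 1)
  else res

-- one iteration of Source B's 'for i in range(len(value) // m)'
def pvChunkStep (m v_min v_max : Int) (cs : List Char) (res : List Int) (i : Int) : List Int :=
  pvBucketB v_min v_max res
    ((pvFindRun (PySem.List.slice cs (some (i * m)) (some ((i + 1) * m))) 0 : Nat) : Int)

def pvChunks (m v_min v_max : Int) (cs : List Char) (res : List Int) : List Int :=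
  (PySem.List.pyRange 0 (PySem.Int.floordiv (cs.length : Int) m) 1).foldl (pvChunkStep m v_min v_max cs) res

def calcul_max_run_alt (value : String) (m : Int) (k : Int) (v_min : Int) (v_max : Int) : List Int :=
  let res0 := PySem.List.pyRepeat [(0 : Int)] (k + 1)
  if m ≤ 0 then res0 else pvChunks m v_min v_max value.toList res0

-- ===== PRECONDITION & SPEC =====
-- Pre_ excludes inputs on which A's bucket index can fall outside result and Python raises
-- IndexError (negative k while a complete window exists, or a window max-run strictly between
-- v_min and v_max at distance > k from v_min); it is a shape condition (a window run is at most
-- m long), so it also excludes some inputs whose concrete windows happen to stay in range and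
-- on which A returns — B returns the same value there.
def Pre_calcul_max_run (value : String) (m : Int) (k : Int) (v_min : Int) (v_max : Int) : Prop :=
  m ≤ 0 ∨ (value.toList.length : Int) < m ∨ (0 ≤ k ∧ min m (v_max - 1) ≤ v_min + k)
instance (value : String) (m : Int) (k : Int) (v_min : Int) (v_max : Int) : Decidable (Pre_calcul_max_run value m k v_min v_max) := by unfold Pre_calcul_max_run; infer_instance

def pvWitness_calcul_max_run : String × Int × Int × Int × Int := ("1101", 2, 3, 0, 4)

def Spec_calcul_max_run (value : String) (m : Int) (k : Int) (v_min : Int) (v_max : Int) (out : List Int) : Prop := out = calcul_max_run_alt value m k v_min v_max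
instance (value : String) (m : Int) (k : Int) (v_min : Int) (v_max : Int) (out : List Int) : Decidable (Spec_calcul_max_run value m k v_min v_max out) := by unfold Spec_calcul_max_run; infer_instance

-- ===== CLAIM (what is proved, stated in full; the proofs are below) =====
def Claim_equal_calcul_max_run : Prop := ∀ (value : String) (m : Int) (k : Int) (v_min : Int) (v_max : Int), Dom_calcul_max_run value m k v_min v_max → Pre_calcul_max_run value m k v_min v_max → Spec_calcul_max_run value m k v_min v_max (calcul_max_run value m k v_min v_max)

-- ===== LEMMAS AND PROOFS =====

-- length of the leading run of '1's
def pvLead : List Char → Nat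
  | [] => 0
  | ch :: t => if ch = '1' then pvLead t + 1 else 0

-- length of the longest run of '1's
def pvMax : List Char → Nat
  | [] => 0
  | ch :: t => if ch = '1' then max (pvLead t + 1) (pvMax t) else pvMax t

theorem pvLead_le_pvMax (s : List Char) : pvLead s ≤ pvMax s := by
  induction s with
  | nil => simp [pvLead, pvMax]
  | cons ch t ih => by_cases h : ch = '1' <;> simp [pvLead, pvMax, h]

theorem pvMax_cons (ch : Char) (t : List Char) :
    pvMax (ch :: t) = max (pvLead (ch :: t)) (pvMax t) := by
  by_cases h : ch = '1' <;> simp [pvLead, pvMax, h]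

theorem pv_replicate_prefix (s : List Char) : ∀ L : Nat, (List.replicate L '1' <+: s ↔ L ≤ pvLead s) := by
  induction s with
  | nil =>
    intro L; cases L with
    | zero => simp
    | succ L => simp [List.replicate_succ, pvLead]
  | cons ch t ih =>
    intro L; cases L with
    | zero => simp
    | succ L =>
      rw [List.replicate_succ, List.cons_prefix_cons]
      by_cases h : ch = '1'
      · simp [pvLead, h, ih L]
      · simp only [pvLead, if_neg h]
        constructor
        · rintro ⟨hc, -⟩; exact absurd hc.symm h
        · omega

theorem pv_replicate_infix (s : List Char) : ∀ L : Nat, (List.replicate L '1' <:+: s ↔ L ≤ pvMax s) := by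
  induction s with
  | nil =>
    intro L; cases L with
    | zero => simp
    | succ L => simp [List.replicate_succ, pvMax]
  | cons ch t ih =>
    intro L
    rw [List.infix_cons_iff, pv_replicate_prefix (ch :: t) L, ih L, pvMax_cons]
    omega

theorem pvTest (s : List Char) (r : Nat) :
    ((PySem.Chars.isIn (PySem.List.pyRepeat ['1'] ((r : Int) + 1)) s = true) ↔ r + 1 ≤ pvMax s) := by
  rw [PySem.Chars.isIn_iff_infix, PySem.List.pyRepeat_singleton,
    show ((r : Int) + 1).toNat = r + 1 by omega, pv_replicate_infix]

theorem pvFindRun_eq (s : List Char) : ∀ r : Nat, r ≤ pvMax s → pvFindRun s r = pvMax s := by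
  have key : ∀ n r, pvMax s - r = n → r ≤ pvMax s → pvFindRun s r = pvMax s := by
    intro n
    induction n with
    | zero =>
      intro r h1 h2
      rw [pvFindRun, dif_neg]
      · omega
      · rw [pvTest]; omega
    | succ n ih =>
      intro r h1 h2
      rw [pvFindRun, dif_pos, ih (r + 1) (by omega) (by omega)]
      rw [pvTest]; omega
  intro r h; exact key (pvMax s - r) r rfl h

-- the counter-pair update embedded in pvStepA
def pvScan (p : Int × Int) (s : List Char) : Int × Int :=
  s.foldl (fun q ch => if ch = '1' then (if q.2 + 1 > q.1 then q.2 + 1 else q.1, q.2 + 1) else (q.1, 0)) p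

theorem pvScan_fst (s : List Char) : ∀ cm c : Int, 0 ≤ c → c ≤ cm →
    (pvScan (cm, c) s).1 = max cm (max (c + (pvLead s : Int)) (pvMax s : Int)) := by
  induction s with
  | nil => intro cm c h0 h1; simp [pvScan, pvLead, pvMax]; omega
  | cons ch t ih =>
    intro cm c h0 h1
    by_cases h : ch = '1'
    · have step : pvScan (cm, c) (ch :: t)
          = pvScan (if c + 1 > cm then c + 1 else cm, c + 1) t := by
        simp [pvScan, h]
      rw [step, ih _ _ (by omega) (by split <;> omega)]
      simp only [pvLead, pvMax, if_pos h]
      push_cast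
      split <;> omega
    · have step : pvScan (cm, c) (ch :: t) = pvScan (cm, 0) t := by
        simp [pvScan, h]
      rw [step, ih _ _ (by omega) (by omega)]
      have := pvLead_le_pvMax t
      simp only [pvLead, pvMax, if_neg h]
      push_cast
      omega

theorem pvScan_max (s : List Char) : (pvScan (0, 0) s).1 = ((pvMax s : Nat) : Int) := by
  rw [pvScan_fst s 0 0 le_rfl le_rfl]
  have := pvLead_le_pvMax s
  omega

theorem pvStepA_split (m v_min v_max : Int) (s : List Char) : ∀ (cm c ci : Int) (res : List Int),
    (∀ j : Nat, 1 ≤ j → j ≤ s.length → ci + (j : Int) ≠ m) →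
    s.foldl (pvStepA m v_min v_max) (cm, c, ci, res)
      = ((pvScan (cm, c) s).1, (pvScan (cm, c) s).2, ci + (s.length : Int), res) := by
  induction s with
  | nil => intro cm c ci res _; simp [pvScan]
  | cons ch t ih =>
    intro cm c ci res hcond
    have h1 : ci + 1 ≠ m := by
      have := hcond 1 le_rfl (by simp)
      simpa using this
    have hlen : ci + ((ch :: t).length : Int) = (ci + 1) + (t.length : Int) := by
      simp; ring
    by_cases h : ch = '1'
    · have stepA : (ch :: t).foldl (pvStepA m v_min v_max) (cm, c, ci, res)
          = t.foldl (pvStepA m v_min v_max)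
              (if c + 1 > cm then c + 1 else cm, c + 1, ci + 1, res) := by
        simp [pvStepA, h, h1]
      have stepS : pvScan (cm, c) (ch :: t)
          = pvScan (if c + 1 > cm then c + 1 else cm, c + 1) t := by
        simp [pvScan, h]
      rw [stepA, stepS, hlen]
      exact ih _ _ _ _ (fun j hj1 hj2 => by
        have := hcond (j + 1) (by omega) (by simp; omega)
        push_cast at this ⊢
        omega)
    · have stepA : (ch :: t).foldl (pvStepA m v_min v_max) (cm, c, ci, res)
          = t.foldl (pvStepA m v_min v_max) (cm, 0, ci + 1, res) := by
        simp [pvStepA, h, h1]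
      have stepS : pvScan (cm, c) (ch :: t) = pvScan (cm, 0) t := by
        simp [pvScan, h]
      rw [stepA, stepS, hlen]
      exact ih _ _ _ _ (fun j hj1 hj2 => by
        have := hcond (j + 1) (by omega) (by simp; omega)
        push_cast at this ⊢
        omega)

theorem pvChunk_run (m v_min v_max : Int) (c : List Char) (res : List Int)
    (hlen : c.length = m.toNat) (hm : 1 ≤ m) :
    c.foldl (pvStepA m v_min v_max) (0, 0, 0, res)
      = (0, 0, 0, pvBucketA v_min v_max res ((pvMax c : Nat) : Int)) := by
  obtain rfl | ⟨c', ch, rfl⟩ := c.eq_nil_or_concat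
  · simp at hlen; omega
  · rw [List.concat_eq_append] at hlen ⊢
    have hlc : c'.length + 1 = m.toNat := by simpa using hlen
    rw [List.foldl_append,
      pvStepA_split m v_min v_max c' 0 0 0 res (fun j hj1 hj2 => by omega)]
    have hs : (pvScan ((0 : Int), (0 : Int)) (c' ++ [ch])).1
        = ((pvMax (c' ++ [ch]) : Nat) : Int) := pvScan_max _
    have hsplit : pvScan ((0 : Int), (0 : Int)) (c' ++ [ch])
        = (fun q ch => if ch = '1' then
              (if q.2 + 1 > q.1 then q.2 + 1 else q.1, q.2 + 1) else (q.1, 0))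
            (pvScan ((0 : Int), (0 : Int)) c') ch := by
      simp [pvScan, List.foldl_append]
    rw [hsplit] at hs
    have hcond : (0 : Int) + (c'.length : Int) + 1 = m := by omega
    simp only [List.foldl_cons, List.foldl_nil, pvStepA, hcond, if_pos]
    by_cases hch : ch = '1' <;> simp only [hch, if_pos, ite_false] at hs ⊢ <;> rw [← hs]

theorem pvBucketAB (v_min v_max : Int) (res : List Int) (x : Int) :
    pvBucketA v_min v_max res x = pvBucketB v_min v_max res x := rfl

theorem pvChunks_small (m v_min v_max : Int) (cs : List Char) (res : List Int)
    (hm : 1 ≤ m) (h : (cs.length : Int) < m) : pvChunks m v_min v_max cs res = res := by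
  unfold pvChunks
  have h0 : PySem.Int.floordiv (cs.length : Int) m = 0 := by
    rw [PySem.Int.floordiv_eq_ediv_of_pos (by omega)]
    exact Int.ediv_eq_zero_of_lt (by omega) h
  rw [h0, PySem.List.pyRange_one_eq_nil le_rfl]
  rfl

theorem pvA_small (m v_min v_max : Int) (cs : List Char) (res : List Int)
    (h : (cs.length : Int) < m) :
    (cs.foldl (pvStepA m v_min v_max) (0, 0, 0, res)).2.2.2 = res := by
  rw [pvStepA_split m v_min v_max cs 0 0 0 res (fun j hj1 hj2 => by
    have : (j : Int) ≤ (cs.length : Int) := by exact_mod_cast hj2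
    omega)]

theorem pvFloordiv_step (m : Int) (len : Nat) (hm : 1 ≤ m) (h : m ≤ (len : Int)) :
    PySem.Int.floordiv ((len - m.toNat : Nat) : Int) m = PySem.Int.floordiv (len : Int) m - 1 := by
  rw [PySem.Int.floordiv_eq_ediv_of_pos (by omega), PySem.Int.floordiv_eq_ediv_of_pos (by omega)]
  have hcast : ((len - m.toNat : Nat) : Int) = (len : Int) - m := by omega
  rw [hcast]
  have hstep := Int.add_mul_ediv_right (len : Int) (-1) (show m ≠ 0 by omega)
  calc ((len : Int) - m) / m = ((len : Int) + (-1) * m) / m := by ring_nf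
    _ = (len : Int) / m + (-1) := hstep
    _ = (len : Int) / m - 1 := by ring

theorem pvChunkStep_shift (m v_min v_max : Int) (hm : 1 ≤ m) (cs : List Char)
    (res : List Int) (k : Nat) :
    pvChunkStep m v_min v_max cs res (1 + (k : Int))
      = pvChunkStep m v_min v_max (cs.drop m.toNat) res ((0 : Int) + (k : Int)) := by
  have hmM : (m.toNat : Int) = m := Int.toNat_of_nonneg (by omega)
  have hslice : PySem.List.slice cs (some ((1 + (k : Int)) * m)) (some ((1 + (k : Int) + 1) * m))
      = PySem.List.slice (cs.drop m.toNat) (some (((0 : Int) + (k : Int)) * m))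
          (some (((0 : Int) + (k : Int) + 1) * m)) := by
    have e1 : (1 + (k : Int)) * m = (((1 + k) * m.toNat : Nat) : Int) := by push_cast [hmM]; ring
    have e2 : (1 + (k : Int) + 1) * m = (((2 + k) * m.toNat : Nat) : Int) := by push_cast [hmM]; ring
    have e3 : ((0 : Int) + (k : Int)) * m = ((k * m.toNat : Nat) : Int) := by push_cast [hmM]; ring
    have e4 : ((0 : Int) + (k : Int) + 1) * m = (((k + 1) * m.toNat : Nat) : Int) := by
      push_cast [hmM]; ring
    rw [e1, e2, e3, e4, PySem.List.slice_natCast, PySem.List.slice_natCast, List.drop_drop]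
    have h1 : (2 + k) * m.toNat - (1 + k) * m.toNat = m.toNat := by
      have : (2 + k) * m.toNat = (1 + k) * m.toNat + m.toNat := by ring
      omega
    have h2 : (k + 1) * m.toNat - k * m.toNat = m.toNat := by
      have : (k + 1) * m.toNat = k * m.toNat + m.toNat := by ring
      omega
    have h3 : m.toNat + k * m.toNat = (1 + k) * m.toNat := by ring
    rw [h1, h2, h3]
  unfold pvChunkStep
  rw [hslice]

theorem pvMain (m v_min v_max : Int) (hm : 1 ≤ m) : ∀ (n : Nat) (cs : List Char) (res : List Int),
    cs.length ≤ n →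
    (cs.foldl (pvStepA m v_min v_max) (0, 0, 0, res)).2.2.2 = pvChunks m v_min v_max cs res := by
  intro n
  induction n with
  | zero =>
    intro cs res hn
    have h : (cs.length : Int) < m := by omega
    rw [pvA_small m v_min v_max cs res h, pvChunks_small m v_min v_max cs res hm h]
  | succ n ih =>
    intro cs res hn
    by_cases hsmall : (cs.length : Int) < m
    · rw [pvA_small m v_min v_max cs res hsmall, pvChunks_small m v_min v_max cs res hm hsmall]
    · have hml : m ≤ (cs.length : Int) := by omega
      have hmM : (m.toNat : Int) = m := Int.toNat_of_nonneg (by omega)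
      have hMle : m.toNat ≤ cs.length := by omega
      -- A side: first window then the rest
      have hsplitA : cs = cs.take m.toNat ++ cs.drop m.toNat := (List.take_append_drop _ _).symm
      have htlen : (cs.take m.toNat).length = m.toNat := by
        rw [List.length_take]; omega
      conv_lhs => rw [hsplitA]
      rw [List.foldl_append, pvChunk_run m v_min v_max _ res htlen hm,
        ih (cs.drop m.toNat) _ (by rw [List.length_drop]; omega)]
      -- B side: peel the first index off the range
      have hn1 : (1 : Int) ≤ PySem.Int.floordiv (cs.length : Int) m :=
        (PySem.Int.le_floordiv_iff_mul_le (by omega)).mpr (by omega)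
      conv_rhs => rw [pvChunks]
      rw [PySem.List.pyRange_one_cons (by omega), List.foldl_cons]
      -- the two first-window results coincide
      have hchunk0 : PySem.List.slice cs (some ((0 : Int) * m)) (some (((0 : Int) + 1) * m))
          = cs.take m.toNat := by
        rw [show ((0 : Int) * m) = ((0 : Nat) : Int) by ring,
          show (((0 : Int) + 1) * m) = ((m.toNat : Nat) : Int) by omega,
          PySem.List.slice_natCast, List.drop_zero, Nat.sub_zero]
      have hfirst : pvChunkStep m v_min v_max cs res 0
          = pvBucketA v_min v_max res ((pvMax (cs.take m.toNat) : Nat) : Int) := by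
        unfold pvChunkStep
        rw [hchunk0, pvFindRun_eq _ 0 (Nat.zero_le _), pvBucketAB]
      rw [hfirst]
      -- the remaining windows of cs are the windows of the dropped list
      conv_lhs => rw [pvChunks, List.length_drop, pvFloordiv_step m cs.length hm hml]
      rw [show ((0 : Int) + 1) = (1 : Int) by ring]
      rw [PySem.List.pyRange_one 1 (PySem.Int.floordiv (cs.length : Int) m),
        PySem.List.pyRange_one 0 (PySem.Int.floordiv (cs.length : Int) m - 1),
        show (PySem.Int.floordiv (cs.length : Int) m - 1 - 0 : Int)
          = PySem.Int.floordiv (cs.length : Int) m - 1 by ring,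
        List.foldl_map, List.foldl_map]
      apply PySem.List.foldl_congr_mem
      intro acc x _
      exact (pvChunkStep_shift m v_min v_max hm cs acc x).symm

theorem pvRes0 (k : Int) :
    (PySem.List.pyRange 0 (k + 1) 1).foldl (fun acc _ => acc ++ [(0 : Int)]) []
      = PySem.List.pyRepeat [(0 : Int)] (k + 1) := by
  have gen : ∀ (l acc : List Int),
      l.foldl (fun acc _ => acc ++ [(0 : Int)]) acc = acc ++ List.replicate l.length 0 := by
    intro l
    induction l with
    | nil => simp
    | cons x t ih =>
      intro acc
      rw [List.foldl_cons, ih, List.append_assoc]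
      rfl
  rw [gen, PySem.List.pyRepeat_singleton, PySem.List.length_pyRange_one]
  simp

-- ===== VERDICT (by name: the statement is the Claim_ definition above) =====
theorem calcul_max_run_spec : Claim_equal_calcul_max_run := by
  intro value m k v_min v_max _ _
  simp only [Spec_calcul_max_run, calcul_max_run, calcul_max_run_alt]
  rw [pvRes0]
  by_cases hm : m ≤ 0
  · rw [if_pos hm,
      pvStepA_split m v_min v_max _ 0 0 0 _ (fun j hj1 hj2 => by omega)]
  · rw [if_neg hm]
    exact pvMain m v_min v_max (by omega) value.toList.length value.toList _ le_rfl
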